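-- pv_equiv track=rewrite | github.com/mobility-team/mobility | mobility/transport_modes/compute_subtour_mode_probs_parallel_utilities.py | split_at_home
-- ===== SOURCE A (Python) =====
-- def split_at_home(locations):
--     parts = []
--     home = locations[0]
--     current = [locations[0]]
--     for loc in locations[1:]:
--         current.append(loc)
--         if loc == home and len(current) > 1:
--             parts.append(current)
--             current = [home]
--     if len(current) > 1:
--         parts.append(current)
--     return parts
-- ===== SOURCE B (Python) =====
-- def split_at_home(locations):
--     home = locations[0]
--     n = len(locations)
--     parts = []
--     start = 0
--     for i in range(1, n):
--         if locations[i] == home: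
--             parts.append(locations[start:i + 1])
--             start = i
--     if start < n - 1:
--         parts.append(locations[start:])
--     return parts
-- ===== Notes on version B (the rewrite author's own statement) =====
-- stated objective: alternative
-- what changed: B tracks only an index boundary and emits whole slices locations[start:i+1] at each home revisit, instead of A's element-by-element accumulation into a running 'current' buffer that is appended and reset.
import Mathlib
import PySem

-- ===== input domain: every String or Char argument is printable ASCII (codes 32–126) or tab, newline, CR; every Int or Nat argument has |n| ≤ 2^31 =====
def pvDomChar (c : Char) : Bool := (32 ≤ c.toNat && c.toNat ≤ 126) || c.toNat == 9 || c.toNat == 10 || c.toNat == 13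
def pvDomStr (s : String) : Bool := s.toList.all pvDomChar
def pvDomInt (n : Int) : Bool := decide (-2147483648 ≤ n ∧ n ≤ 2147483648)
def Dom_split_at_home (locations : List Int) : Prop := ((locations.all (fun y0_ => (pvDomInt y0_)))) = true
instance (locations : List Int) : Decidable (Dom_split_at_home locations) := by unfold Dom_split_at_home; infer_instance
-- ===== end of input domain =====

-- B replaces A's element-by-element 'current' buffer by an index boundary and whole slices (same cost; alternative decomposition). Both Pythons raise IndexError on the empty list; Pre_ excludes it.

-- ===== PORT A =====
-- loop body of A: append loc to current, emit current and reset to [home] when loc == home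
def aStep (home : Int) (st : List (List Int) × List Int) (loc : Int) : List (List Int) × List Int :=
  let cur := st.2 ++ [loc]
  if loc = home ∧ 1 < cur.length then (st.1 ++ [cur], [home]) else (st.1, cur)

-- trailing 'if len(current) > 1: parts.append(current)'
def aFin (st : List (List Int) × List Int) : List (List Int) :=
  if 1 < st.2.length then st.1 ++ [st.2] else st.1

def split_at_home (locations : List Int) : List (List Int) :=
  match locations with
  | [] => []   -- IndexError in Python on the empty list; excluded by Pre_
  | home :: rest =>
    aFin (rest.foldl (aStep home) ([], [home]))

-- ===== PORT B =====
-- loop body of B: on locations[i] == home, emit the slice locations[start:i+1] and move the boundary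
def bStep (locations : List Int) (home : Int) (st : List (List Int) × Int) (i : Int) : List (List Int) × Int :=
  if PySem.List.pyGetD locations i 0 = home
  then (st.1 ++ [PySem.List.slice locations (some st.2) (some (i + 1))], i)
  else st

-- trailing 'if start < n - 1: parts.append(locations[start:])'
def bFin (locations : List Int) (st : List (List Int) × Int) : List (List Int) :=
  if st.2 < (locations.length : Int) - 1
  then st.1 ++ [PySem.List.slice locations (some st.2) none] else st.1

def split_at_home_alt (locations : List Int) : List (List Int) :=
  match locations with
  | [] => []   -- IndexError in Python on the empty list; excluded by Pre_
  | home :: _ =>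
    bFin locations ((PySem.List.pyRange 1 (locations.length : Int)).foldl
      (bStep locations home) ([], 0))

-- ===== PRECONDITION & SPEC =====
-- Pre_ excludes only the empty list, on which both Pythons raise IndexError reading the first element.
def Pre_split_at_home (locations : List Int) : Prop := locations ≠ []
instance (locations : List Int) : Decidable (Pre_split_at_home locations) := by unfold Pre_split_at_home; infer_instance

def pvWitness_split_at_home : List Int := [0, 1, 2, 0, 3]

def Spec_split_at_home (locations : List Int) (out : List (List Int)) : Prop := out = split_at_home_alt locations
instance (locations : List Int) (out : List (List Int)) : Decidable (Spec_split_at_home locations out) := by unfold Spec_split_at_home; infer_instance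

-- ===== CLAIM (what is proved, stated in full; the proofs are below) =====
def Claim_equal_split_at_home : Prop := ∀ (locations : List Int), Dom_split_at_home locations → Pre_split_at_home locations → Spec_split_at_home locations (split_at_home locations)

-- ===== LEMMAS AND PROOFS =====

-- the segment locations[s:e] (nonnegative bounds)
def seg (L : List Int) (s e : Nat) : List Int := (L.drop s).take (e - s)

theorem seg_snoc (L : List Int) (s e : Nat) (_hse : s ≤ e) (he : e < L.length) :
    seg L s e ++ [L[e]] = seg L s (e + 1) := by
  unfold seg
  have h1 : e + 1 - s = (e - s) + 1 := by omega
  rw [h1, List.take_add_one]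
  have h2 : (L.drop s)[e - s]? = some L[e] := by
    rw [List.getElem?_drop]
    have h3 : s + (e - s) = e := by omega
    rw [h3, List.getElem?_eq_getElem he]
  rw [h2]
  rfl

theorem length_seg (L : List Int) (s e : Nat) (_hse : s ≤ e) (he : e ≤ L.length) :
    (seg L s e).length = e - s := by
  unfold seg
  simp [List.length_take, List.length_drop]
  omega

theorem loop_eq (L : List Int) (home : Int) (tl : List Int) :
    ∀ (i s : Nat) (P : List (List Int)), s ≤ i → i + 1 ≤ L.length → L.drop (i + 1) = tl →
    aFin (tl.foldl (aStep home) (P, seg L s (i + 1)))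
      = bFin L ((PySem.List.pyRange ((i : Int) + 1) (L.length : Int)).foldl
          (bStep L home) (P, (s : Int))) := by
  induction tl with
  | nil =>
    intro i s P hsi hi hdrop
    have hlen : L.length = i + 1 := by
      have := List.drop_eq_nil_iff.mp hdrop
      omega
    have hrange : PySem.List.pyRange ((i : Int) + 1) (L.length : Int) = [] := by
      apply List.eq_nil_iff_forall_not_mem.mpr
      intro x hx
      have := (PySem.List.mem_pyRange_one).mp hx
      omega
    rw [hrange]
    simp only [List.foldl_nil, aFin, bFin]
    have hseg : seg L s (i + 1) = L.drop s := by
      unfold seg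
      apply List.take_of_length_le
      simp [List.length_drop]; omega
    have hlseg : (seg L s (i + 1)).length = i + 1 - s := length_seg L s (i+1) (by omega) (by omega)
    have hslice : PySem.List.slice L (some (s : Int)) none = L.drop s :=
      PySem.List.slice_from_natCast L s
    by_cases hcond : s < i
    · rw [if_pos (by rw [hlseg]; omega), if_pos (by omega), hseg, hslice]
    · rw [if_neg (by rw [hlseg]; omega), if_neg (by omega)]
  | cons a tl ih =>
    intro i s P hsi hi hdrop
    have hlt : i + 1 < L.length := by
      have h := congrArg List.length hdrop
      simp [List.length_drop] at h
      omega
    have hget : L[i + 1]'hlt = a := by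
      have h0 : (L.drop (i + 1))[0]? = some a := by rw [hdrop]; rfl
      rw [List.getElem?_drop] at h0
      simpa [List.getElem?_eq_getElem hlt] using h0
    have hdrop2 : L.drop (i + 2) = tl := by
      have : L.drop (i + 2) = (L.drop (i + 1)).drop 1 := by
        rw [List.drop_drop]
      rw [this, hdrop]; rfl
    -- one step on each side
    have hcur : seg L s (i + 1) ++ [a] = seg L s (i + 2) := by
      rw [← hget]; exact seg_snoc L s (i + 1) (by omega) hlt
    have hcurlen : (seg L s (i + 1) ++ [a]).length = i + 2 - s := by
      simp [length_seg L s (i+1) (by omega) (by omega)]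
      omega
    have hrange : PySem.List.pyRange ((i : Int) + 1) (L.length : Int)
        = ((i : Int) + 1) :: PySem.List.pyRange ((i : Int) + 1 + 1) (L.length : Int) :=
      PySem.List.pyRange_one_cons (by exact_mod_cast hlt)
    have hgetD : PySem.List.pyGetD L ((i : Int) + 1) 0 = a := by
      have hc : ((i : Int) + 1) = ((i + 1 : Nat) : Int) := by push_cast; ring
      rw [hc, PySem.List.pyGetD_natCast, List.getD_eq_getElem?_getD,
        List.getElem?_eq_getElem hlt, hget]
      rfl
    rw [hrange]
    simp only [List.foldl_cons]
    by_cases ha : a = home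
    · -- boundary: both sides emit locations[s:i+2] and restart at i+1
      have hA : aStep home (P, seg L s (i + 1)) a
          = (P ++ [seg L s (i + 2)], [home]) := by
        unfold aStep
        rw [if_pos ⟨ha, by rw [hcurlen]; omega⟩, hcur]
      have hslice : PySem.List.slice L (some (s : Int)) (some ((i : Int) + 1 + 1))
          = seg L s (i + 2) := by
        have hc : ((i : Int) + 1 + 1) = ((i + 2 : Nat) : Int) := by push_cast; ring
        rw [hc, PySem.List.slice_natCast]
        rfl
      have hB : bStep L home (P, (s : Int)) ((i : Int) + 1)
          = (P ++ [seg L s (i + 2)], (i : Int) + 1) := by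
        unfold bStep
        rw [if_pos (by rw [hgetD, ha]), hslice]
      rw [hA, hB]
      have hseg1 : seg L (i + 1) (i + 2) = [home] := by
        have := seg_snoc L (i + 1) (i + 1) (le_refl _) hlt
        simpa [seg, hget, ha] using this.symm
      have hc : ((i : Int) + 1) = ((i + 1 : Nat) : Int) := by push_cast; ring
      rw [hc, ← hseg1]
      exact ih (i + 1) (i + 1) (P ++ [seg L s (i + 2)]) (le_refl _) (by omega) hdrop2
    · -- interior point: A extends current, B keeps the boundary
      have hA : aStep home (P, seg L s (i + 1)) a = (P, seg L s (i + 2)) := by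
        unfold aStep
        rw [if_neg (by intro h; exact ha h.1), hcur]
      have hB : bStep L home (P, (s : Int)) ((i : Int) + 1) = (P, (s : Int)) := by
        unfold bStep
        rw [if_neg (by rw [hgetD]; exact ha)]
      rw [hA, hB]
      have h2 : seg L s (i + 2) = seg L s (i + 1 + 1) := by norm_num
      rw [h2]
      exact ih (i + 1) s P (by omega) (by omega) hdrop2

-- ===== VERDICT (by name: the statement is the Claim_ definition above) =====
theorem split_at_home_spec : Claim_equal_split_at_home := by
  intro locations _ hpre
  unfold Spec_split_at_home
  match locations with
  | [] => exact absurd rfl hpre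
  | home :: rest =>
    unfold split_at_home split_at_home_alt
    have h := loop_eq (home :: rest) home rest 0 0 [] (le_refl _) (by simp) (by simp)
    simpa [seg] using h
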